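-- pv_equiv track=rewrite | github.com/stratancorina/PythonLaboratoare | Lab2/ex9.py | ex9
-- ===== SOURCE A (Python) =====
-- def ex9(matrix):
--     result = []
--     for i in range(len(matrix)):
--         for j in range(len(matrix[i])):
--             for k in range(i):
--                 if matrix[k][j] >= matrix[i][j]:
--                     result.append((i, j))
--                     break
--     return result
-- ===== SOURCE B (Python) =====
-- def ex9(matrix):
--     result = []
--     colmax = []
--     for i, row in enumerate(matrix):
--         for j, (c, v) in enumerate(zip(colmax, row)):
--             if c >= v:
--                 result.append((i, j))
--         colmax = [max(c, v) for c, v in zip(colmax, row)] + colmax[len(row):] + row[len(colmax):]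
--     return result
-- ===== Notes on version B (the rewrite author's own statement) =====
-- stated objective: alternative
-- what changed: Replaced A's per-cell rescan of all prior rows by a single top-to-bottom pass that keeps a running per-column maximum, emitting (i,j) when the running max for column j already dominates the current value; on inputs where A's inner break rarely fires this avoids the rescan, but measured times are comparable.
import Mathlib
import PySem

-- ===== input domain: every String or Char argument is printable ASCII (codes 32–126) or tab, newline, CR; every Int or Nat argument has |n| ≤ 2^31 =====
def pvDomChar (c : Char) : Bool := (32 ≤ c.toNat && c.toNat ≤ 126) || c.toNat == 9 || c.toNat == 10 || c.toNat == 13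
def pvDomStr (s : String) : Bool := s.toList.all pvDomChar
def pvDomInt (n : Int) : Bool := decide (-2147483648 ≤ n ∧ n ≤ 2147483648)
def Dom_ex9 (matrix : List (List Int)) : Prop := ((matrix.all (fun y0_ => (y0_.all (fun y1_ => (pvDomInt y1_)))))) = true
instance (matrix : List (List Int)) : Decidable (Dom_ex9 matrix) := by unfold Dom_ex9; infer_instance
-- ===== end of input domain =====

-- B replaces A's per-cell scan of all prior rows by a single top-to-bottom pass keeping a running
-- per-column maximum (a different algorithm; same return value on every input where A returns).


-- ===== PORT A =====
-- the inner 'for k in range(i): if …: append; break' loop, as a boolean search (true = appended+broke)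
def ex9Inner (matrix : List (List Int)) (i j : Nat) : List Nat → Bool
  | [] => false
  | k :: ks =>
    if (matrix.getD i []).getD j 0 ≤ (matrix.getD k []).getD j 0 then true
    else ex9Inner matrix i j ks

def ex9 (matrix : List (List Int)) : List (Int × Int) :=
  (List.range matrix.length).foldl (fun res i =>
    (List.range (matrix.getD i []).length).foldl (fun res j =>
      if ex9Inner matrix i j (List.range i) then res ++ [((i : Int), (j : Int))] else res) res) []

-- ===== PORT B =====
-- hits of one row against the running column maxima: 'for j,(c,v) in enumerate(zip(colmax,row)): if c >= v: append (i,j)'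
def hitsRow (i : Int) (cm row : List Int) : List (Int × Int) :=
  (PySem.List.enumerate (cm.zip row)).filterMap
    (fun p => if p.2.2 ≤ p.2.1 then some (i, p.1) else none)

-- '[max(c,v) for c,v in zip(colmax,row)] + colmax[len(row):] + row[len(colmax):]'
def updCM (cm row : List Int) : List Int :=
  cm.zipWith max row ++ cm.drop row.length ++ row.drop cm.length

def ex9_alt (matrix : List (List Int)) : List (Int × Int) :=
  ((PySem.List.enumerate matrix).foldl
    (fun st p => (st.1 ++ hitsRow p.1 st.2 p.2, updCM st.2 p.2)) ([], [])).1

-- ===== PRECONDITION & SPEC =====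
-- Pre_ex9 holds exactly when A raises no IndexError: whenever cell (i,j) compares against a prior
-- row k that is too short to have column j, some even earlier row must already have matched (break).
def Pre_ex9 (matrix : List (List Int)) : Prop :=
  ∀ i < matrix.length, ∀ j < (matrix.getD i []).length, ∀ k < i,
    j < (matrix.getD k []).length ∨
    ∃ k' < k, j < (matrix.getD k' []).length ∧
      (matrix.getD i []).getD j 0 ≤ (matrix.getD k' []).getD j 0
instance (matrix : List (List Int)) : Decidable (Pre_ex9 matrix) := by unfold Pre_ex9; infer_instance

def pvWitness_ex9 : List (List Int) := [[1, 2], [0, 3], [2, 2]]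

def Spec_ex9 (matrix : List (List Int)) (out : List (Int × Int)) : Prop := out = ex9_alt matrix
instance (matrix : List (List Int)) (out : List (Int × Int)) : Decidable (Spec_ex9 matrix out) := by unfold Spec_ex9; infer_instance

-- ===== CLAIM (what is proved, stated in full; the proofs are below) =====
def Claim_equal_ex9 : Prop := ∀ (matrix : List (List Int)), Dom_ex9 matrix → Pre_ex9 matrix → Spec_ex9 matrix (ex9 matrix)

-- ===== LEMMAS AND PROOFS =====

-- the canonical description both ports are reduced to
def hitB (matrix : List (List Int)) (i j : Nat) : Bool :=
  (List.range i).any (fun k =>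
    decide (j < (matrix.getD k []).length) &&
    decide ((matrix.getD i []).getD j 0 ≤ (matrix.getD k []).getD j 0))

def rowOut (matrix : List (List Int)) (i : Nat) : List (Int × Int) :=
  ((List.range (matrix.getD i []).length).filter (fun j => hitB matrix i j)).map
    (fun (j : Nat) => ((i : Int), (j : Int)))

def canon (matrix : List (List Int)) : List (Int × Int) :=
  (List.range matrix.length).flatMap (rowOut matrix)

-- running column maximum as an option fold
def omax : Option Int → Option Int → Option Int
  | none, b => b
  | some x, none => some x
  | some x, some y => some (max x y)

def cmOf (rows : List (List Int)) : List Int := rows.foldl updCM []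

theorem hitB_iff (matrix : List (List Int)) (i j : Nat) :
    hitB matrix i j = true ↔ ∃ k < i, j < (matrix.getD k []).length ∧
      (matrix.getD i []).getD j 0 ≤ (matrix.getD k []).getD j 0 := by
  simp [hitB, List.any_eq_true, List.mem_range]

-- ---------- A-side ----------

theorem ex9Inner_eq_true (matrix : List (List Int)) (i j : Nat) (ks : List Nat) :
    ex9Inner matrix i j ks = true ↔
      ∃ k ∈ ks, (matrix.getD i []).getD j 0 ≤ (matrix.getD k []).getD j 0 := by
  induction ks with
  | nil => simp [ex9Inner]
  | cons k ks ih =>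
    simp only [ex9Inner]
    split_ifs with h
    · constructor
      · intro _; exact ⟨k, List.mem_cons_self, h⟩
      · intro _; rfl
    · rw [ih]
      constructor
      · rintro ⟨a, ha, hle⟩; exact ⟨a, List.mem_cons_of_mem _ ha, hle⟩
      · rintro ⟨a, ha, hle⟩
        rcases List.mem_cons.1 ha with rfl | ha'
        · exact absurd hle h
        · exact ⟨a, ha', hle⟩

theorem inner_eq_hitB (matrix : List (List Int)) (hpre : Pre_ex9 matrix)
    (i j : Nat) (hi : i < matrix.length) (hj : j < (matrix.getD i []).length) :
    ex9Inner matrix i j (List.range i) = hitB matrix i j := by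
  rcases h : hitB matrix i j with _ | _
  · -- hitB false: no prior row with column j matches; show inner is false too
    rcases h2 : ex9Inner matrix i j (List.range i) with _ | _
    · rfl
    · exfalso
      rcases (ex9Inner_eq_true matrix i j (List.range i)).1 h2 with ⟨k, hk, hle⟩
      rw [List.mem_range] at hk
      rcases hpre i hi j hj k hk with hlen | ⟨k', hk', hlen', hle'⟩
      · exact absurd ((hitB_iff matrix i j).2 ⟨k, hk, hlen, hle⟩) (by simp [h])
      · exact absurd ((hitB_iff matrix i j).2 ⟨k', hk'.trans hk, hlen', hle'⟩) (by simp [h])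
  · rcases (hitB_iff matrix i j).1 h with ⟨k, hk, _, hle⟩
    exact (ex9Inner_eq_true matrix i j (List.range i)).2 ⟨k, List.mem_range.2 hk, hle⟩

theorem ex9_eq_canon (matrix : List (List Int)) (hpre : Pre_ex9 matrix) :
    ex9 matrix = canon matrix := by
  unfold ex9 canon
  simp only [PySem.List.foldl_append_if, PySem.List.foldl_append_eq_flatMap, List.nil_append]
  refine List.flatMap_congr ?_
  intro i hi
  unfold rowOut
  rw [List.filter_congr (fun j hj =>
    inner_eq_hitB matrix hpre i j (List.mem_range.1 hi) (List.mem_range.1 hj))]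


-- ---------- B-side ----------

theorem updCM_cons_cons (c v : Int) (cm row : List Int) :
    updCM (c :: cm) (v :: row) = max c v :: updCM cm row := by
  simp [updCM]

theorem updCM_nil_left (row : List Int) : updCM [] row = row := by simp [updCM]
theorem updCM_nil_right (cm : List Int) : updCM cm [] = cm := by simp [updCM]

theorem updCM_getElem? (cm row : List Int) (j : Nat) :
    (updCM cm row)[j]? = omax cm[j]? row[j]? := by
  induction cm generalizing row j with
  | nil => simp [updCM_nil_left, omax]
  | cons c cm ih =>
    cases row with
    | nil => simp [updCM_nil_right]; cases (c :: cm)[j]? <;> simp [omax]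
    | cons v row =>
      rw [updCM_cons_cons]
      cases j with
      | zero => simp [omax]
      | succ j => simpa using ih row j

theorem cmOf_append (pre : List (List Int)) (r : List Int) :
    cmOf (pre ++ [r]) = updCM (cmOf pre) r := by
  simp [cmOf]

theorem omax_none_right (a : Option Int) : omax a none = a := by cases a <;> rfl

theorem foldl_updCM_getElem? (rows : List (List Int)) (j : Nat) :
    ∀ (cm : List Int), (rows.foldl updCM cm)[j]? = rows.foldl (fun a r => omax a r[j]?) cm[j]? := by
  induction rows with
  | nil => intro cm; rfl
  | cons r rs ih => intro cm; simp only [List.foldl_cons, ih, updCM_getElem?]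

theorem foldl_omax_some (vs : List Int) : ∀ (v : Int),
    vs.foldl (fun a x => omax a (some x)) (some v) = some (vs.foldl max v) := by
  induction vs with
  | nil => intro v; rfl
  | cons x xs ih => intro v; rw [List.foldl_cons]; exact ih (max v x)

theorem foldl_omax_filterMap (rows : List (List Int)) (j : Nat) :
    ∀ (acc : Option Int), rows.foldl (fun a r => omax a r[j]?) acc
      = (rows.filterMap (fun row => row[j]?)).foldl (fun a x => omax a (some x)) acc := by
  induction rows with
  | nil => intro acc; rfl
  | cons r rs ih =>
    intro acc
    simp only [List.foldl_cons, List.filterMap_cons]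
    cases h : r[j]? with
    | none => simp [omax_none_right, ih]
    | some x => simp [ih]

theorem max?_cons_eq_foldl (v : Int) (vs : List Int) : (v :: vs).max? = some (vs.foldl max v) := by
  induction vs generalizing v with
  | nil => rfl
  | cons x xs ih => rw [List.max?_cons]; simp [ih, List.foldl_assoc]

theorem cmOf_getElem? (pre : List (List Int)) (j : Nat) :
    (cmOf pre)[j]? = (pre.filterMap (fun row => row[j]?)).max? := by
  rw [cmOf, foldl_updCM_getElem?, foldl_omax_filterMap]
  simp only [List.getElem?_nil]
  cases h : pre.filterMap (fun row => row[j]?) with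
  | nil => rfl
  | cons v vs =>
    rw [List.foldl_cons]
    rw [max?_cons_eq_foldl]
    exact foldl_omax_some vs v

-- membership in the column value list
theorem mem_colVals (pre : List (List Int)) (j : Nat) (x : Int) :
    x ∈ pre.filterMap (fun row => row[j]?) ↔
      ∃ k < pre.length, j < (pre.getD k []).length ∧ (pre.getD k []).getD j 0 = x := by
  rw [List.mem_filterMap]
  constructor
  · rintro ⟨row, hrow, hx⟩
    rcases List.mem_iff_getElem.1 hrow with ⟨k, hk, rfl⟩
    rcases List.getElem?_eq_some_iff.1 hx with ⟨hj, hval⟩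
    refine ⟨k, hk, ?_, ?_⟩
    · simpa [List.getD_eq_getElem?_getD, List.getElem?_eq_getElem hk] using hj
    · simp [List.getD_eq_getElem?_getD, List.getElem?_eq_getElem hk, List.getElem?_eq_getElem hj, hval]
  · rintro ⟨k, hk, hj, hval⟩
    refine ⟨pre.getD k [], ?_, ?_⟩
    · simp only [List.getD_eq_getElem?_getD, List.getElem?_eq_getElem hk]
      exact List.getElem_mem hk
    · rw [List.getElem?_eq_getElem hj]
      rw [List.getD_eq_getElem?_getD, List.getElem?_eq_getElem hj] at hval
      simpa using hval

theorem enum_zip_filterMap {γ : Type} (f : Int → Int → Int → Option γ) :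
    ∀ (cm r : List Int) (s : Int),
    (PySem.List.enumerate (cm.zip r) s).filterMap (fun p => f p.1 p.2.1 p.2.2)
    = (List.range (min cm.length r.length)).filterMap
        (fun (j : Nat) => f (s + (j : Int)) (cm.getD j 0) (r.getD j 0)) := by
  intro cm
  induction cm with
  | nil => intro r s; simp
  | cons c cm ih =>
    intro r s
    cases r with
    | nil => simp
    | cons v r =>
      rw [List.zip_cons_cons, PySem.List.enumerate_cons, List.filterMap_cons]
      rw [show min (c :: cm).length (v :: r).length = min cm.length r.length + 1 from by
        simp [Nat.succ_min_succ]]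
      rw [List.range_succ_eq_map, List.filterMap_cons, List.filterMap_map, ih r (s + 1)]
      have harg : (fun j : Nat => f (s + 1 + (j : Int)) (cm.getD j 0) (r.getD j 0))
          = (fun j : Nat => f (s + ((j + 1 : Nat) : Int)) ((c :: cm).getD (j + 1) 0) ((v :: r).getD (j + 1) 0)) := by
        funext j
        have h1 : (c :: cm).getD (j + 1) 0 = cm.getD j 0 := rfl
        have h2 : (v :: r).getD (j + 1) 0 = r.getD j 0 := rfl
        rw [h1, h2]
        congr 1
        push_cast
        ring
      rw [harg]
      simp [Function.comp, Nat.succ_eq_add_one]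

theorem filter_map_eq_filterMap {α β : Type} (p : α → Bool) (f : α → β) (l : List α) :
    (l.filter p).map f = l.filterMap (fun x => if p x then some (f x) else none) := by
  induction l with
  | nil => rfl
  | cons x xs ih =>
    rw [List.filter_cons, List.filterMap_cons]
    cases h : p x <;> simp [ih]

theorem filterMap_range_shrink {γ : Type} (G : Nat → Option γ) :
    ∀ (n m : Nat), m ≤ n → (∀ j, m ≤ j → j < n → G j = none) →
    (List.range n).filterMap G = (List.range m).filterMap G := by
  intro n
  induction n with
  | zero => intro m hm _; simp_all
  | succ n ih =>
    intro m hm hnone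
    rcases Nat.lt_or_ge m (n + 1) with h | h
    · have hmn : m ≤ n := by omega
      rw [List.range_succ, List.filterMap_append]
      rw [show List.filterMap G [n] = [] from by simp [hnone n hmn (by omega)]]
      simpa using ih m hmn (fun j h1 h2 => hnone j h1 (by omega))
    · have : m = n + 1 := by omega
      simp [this]

theorem getD_append_left (pre : List (List Int)) (l : List (List Int)) (k : Nat)
    (hk : k < pre.length) : (pre ++ l).getD k [] = pre.getD k [] := by
  simp [List.getD_eq_getElem?_getD, List.getElem?_append_left hk]

theorem getD_append_self (pre : List (List Int)) (r : List Int) (rs : List (List Int)) :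
    (pre ++ r :: rs).getD pre.length [] = r := by
  simp [List.getD_eq_getElem?_getD]

-- ∃ a prior row with column j whose value dominates v ↔ the running column max dominates v
theorem col_iff (pre : List (List Int)) (j : Nat) (v : Int) :
    (∃ k < pre.length, j < (pre.getD k []).length ∧ v ≤ (pre.getD k []).getD j 0) ↔
      (∃ c, (cmOf pre)[j]? = some c ∧ v ≤ c) := by
  rw [cmOf_getElem?]
  constructor
  · rintro ⟨k, hk, hj, hle⟩
    rcases h : (pre.filterMap (fun row => row[j]?)).max? with _ | c
    · rw [List.max?_eq_none_iff] at h
      have := (mem_colVals pre j ((pre.getD k []).getD j 0)).2 ⟨k, hk, hj, rfl⟩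
      simp [h] at this
    · refine ⟨c, rfl, hle.trans ?_⟩
      have hmem := (mem_colVals pre j ((pre.getD k []).getD j 0)).2 ⟨k, hk, hj, rfl⟩
      exact (List.max?_eq_some_iff.1 h).2 _ hmem
  · rintro ⟨c, hc, hle⟩
    have hmem := List.max?_mem hc
    rcases (mem_colVals pre j c).1 hmem with ⟨k, hk, hj, hval⟩
    exact ⟨k, hk, hj, by rw [hval]; exact hle⟩

-- the per-row hits of B are exactly the canonical row output
theorem hitsRow_eq_rowOut (pre : List (List Int)) (r : List Int) (rs : List (List Int)) :
    hitsRow (pre.length : Int) (cmOf pre) r = rowOut (pre ++ r :: rs) pre.length := by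
  classical
  set cm := cmOf pre with hcm
  set G : Nat → Option (Int × Int) := fun j =>
    match cm[j]? with
    | some c => if r.getD j 0 ≤ c then some ((pre.length : Int), (j : Int)) else none
    | none => none with hG
  have hL : hitsRow (pre.length : Int) cm r = (List.range r.length).filterMap G := by
    rw [hitsRow, enum_zip_filterMap (fun idx c v => if v ≤ c then some ((pre.length : Int), idx) else none) cm r 0]
    rw [filterMap_range_shrink G r.length (min cm.length r.length) (by omega)
      (fun j h1 h2 => by
        have hcmlen : cm.length ≤ j := by omega
        simp [hG, List.getElem?_eq_none hcmlen])]
    refine List.filterMap_congr ?_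
    intro j hj
    rw [List.mem_range] at hj
    have hjcm : j < cm.length := by omega
    simp [hG, List.getD_eq_getElem?_getD, List.getElem?_eq_getElem hjcm]
  have hR : rowOut (pre ++ r :: rs) pre.length = (List.range r.length).filterMap G := by
    rw [rowOut, getD_append_self, filter_map_eq_filterMap]
    refine List.filterMap_congr ?_
    intro j hj
    rw [List.mem_range] at hj
    have hhit : hitB (pre ++ r :: rs) pre.length j = true ↔
        ∃ c, cm[j]? = some c ∧ r.getD j 0 ≤ c := by
      rw [hitB_iff, hcm, ← col_iff]
      constructor
      · rintro ⟨k, hk, hjk, hle⟩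
        rw [getD_append_left pre _ k hk] at hjk hle
        rw [getD_append_self] at hle
        exact ⟨k, hk, hjk, hle⟩
      · rintro ⟨k, hk, hjk, hle⟩
        refine ⟨k, hk, ?_, ?_⟩
        · rwa [getD_append_left pre _ k hk]
        · rwa [getD_append_left pre _ k hk, getD_append_self]
    rcases hc : cm[j]? with _ | c
    · have hfalse : hitB (pre ++ r :: rs) pre.length j = false := by
        rw [Bool.eq_false_iff]
        intro htrue
        rcases hhit.1 htrue with ⟨c, hc', _⟩
        rw [hc] at hc'; cases hc'
      rw [hfalse]
      simp only [hG, hc]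
      simp
    · by_cases hle : r.getD j 0 ≤ c
      · rw [hhit.2 ⟨c, hc, hle⟩]
        simp only [hG, hc, if_pos hle]
        simp
      · have hfalse : hitB (pre ++ r :: rs) pre.length j = false := by
          rw [Bool.eq_false_iff]
          intro htrue
          rcases hhit.1 htrue with ⟨c', hc', hle'⟩
          rw [hc] at hc'; cases hc'; exact hle hle'
        rw [hfalse]
        simp only [hG, hc, if_neg hle]
        simp
  rw [hL, hR]

theorem B_loop (rows : List (List Int)) : ∀ (pre : List (List Int)) (acc : List (Int × Int)),
    ((PySem.List.enumerate rows (pre.length : Int)).foldl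
      (fun st p => (st.1 ++ hitsRow p.1 st.2 p.2, updCM st.2 p.2)) (acc, cmOf pre)).1
    = acc ++ (List.range rows.length).flatMap (fun t => rowOut (pre ++ rows) (pre.length + t)) := by
  induction rows with
  | nil => intro pre acc; simp [PySem.List.enumerate]
  | cons r rs ih =>
    intro pre acc
    rw [PySem.List.enumerate_cons, List.foldl_cons]
    have hstep : ((pre.length : Int) + 1) = (((pre ++ [r]).length : Nat) : Int) := by
      simp
    have hcm : updCM (cmOf pre) r = cmOf (pre ++ [r]) := (cmOf_append pre r).symm
    rw [hstep, hcm, ih (pre ++ [r]) (acc ++ hitsRow (pre.length : Int) (cmOf pre) r)]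
    rw [hitsRow_eq_rowOut pre r rs]
    rw [show pre ++ [r] ++ rs = pre ++ r :: rs from by simp]
    rw [List.length_cons, List.range_succ_eq_map, List.flatMap_cons, List.flatMap_map,
      List.append_assoc]
    congr 1
    congr 1
    refine List.flatMap_congr ?_
    intro t _
    congr 1
    simp [List.length_append]
    omega

theorem ex9_alt_eq_canon (matrix : List (List Int)) : ex9_alt matrix = canon matrix := by
  have h := B_loop matrix [] []
  simp only [List.length_nil, Nat.cast_zero, List.nil_append, cmOf, List.foldl_nil] at h
  unfold ex9_alt
  rw [h]
  unfold canon
  refine List.flatMap_congr ?_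
  intro t ht
  simp

-- ===== VERDICT (by name: the statement is the Claim_ definition above) =====
theorem ex9_spec : Claim_equal_ex9 := by
  intro matrix _ hpre
  unfold Spec_ex9
  rw [ex9_eq_canon matrix hpre, ex9_alt_eq_canon matrix]
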